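-- pv_equiv track=rewrite | github.com/pablo-abagnale/proyectos-AED-2024 | TP2 - Codigos postales 2.0/prueba.py | Dos_mayus
-- ===== SOURCE A (Python) =====
-- def Dos_mayus(dd): #Detecta si hay dos mayus
--     first_mayus = False
--     mm = False
--     for m in dd:
--         if 'A' <= m <= 'Z':
--             if  first_mayus == True:
--                 mm = True
--                 break
--             first_mayus = True
--         else:
--             first_mayus = False
--     return mm
-- ===== SOURCE B (Python) =====
-- def Dos_mayus(dd):
--     return any('A' <= a <= 'Z' and 'A' <= b <= 'Z' for a, b in zip(dd, dd[1:]))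
-- ===== Notes on version B (the rewrite author's own statement) =====
-- stated objective: simpler
-- what changed: Replaces the stateful first_mayus/reset flag loop with a single any() over adjacent character pairs from zip(dd, dd[1:]).
import Mathlib
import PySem

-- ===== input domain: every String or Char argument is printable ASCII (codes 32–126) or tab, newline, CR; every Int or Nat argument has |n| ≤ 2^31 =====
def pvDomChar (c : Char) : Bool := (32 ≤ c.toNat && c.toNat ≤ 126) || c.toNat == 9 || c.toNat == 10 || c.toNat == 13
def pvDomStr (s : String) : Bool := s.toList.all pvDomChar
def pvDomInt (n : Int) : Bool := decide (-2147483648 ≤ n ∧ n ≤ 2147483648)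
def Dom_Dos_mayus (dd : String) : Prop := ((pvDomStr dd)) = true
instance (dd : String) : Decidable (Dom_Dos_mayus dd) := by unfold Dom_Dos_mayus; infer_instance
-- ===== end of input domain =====

-- B replaces A's stateful first-uppercase flag loop with an any() over adjacent pairs (simpler decomposition; same cost).

-- ===== PORT A =====
-- 'A' <= m <= 'Z' on a char
def pvUp (m : Char) : Bool := decide ('A' ≤ m) && decide (m ≤ 'Z')

-- the for-loop over dd with state first_mayus; mm=True immediately breaks and returns True
def pvLoopA : List Char → Bool → Bool
  | [], _ => false
  | m :: rest, first_mayus =>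
      if pvUp m then
        if first_mayus then true else pvLoopA rest true
      else pvLoopA rest false

def Dos_mayus (dd : String) : Bool := pvLoopA dd.toList false

-- ===== PORT B =====
def Dos_mayus_alt (dd : String) : Bool :=
  ((dd.toList).zip (dd.toList.drop 1)).any (fun p => pvUp p.1 && pvUp p.2)

-- ===== PRECONDITION & SPEC =====
def Spec_Dos_mayus (dd : String) (out : Bool) : Prop := out = Dos_mayus_alt dd
instance (dd : String) (out : Bool) : Decidable (Spec_Dos_mayus dd out) := by unfold Spec_Dos_mayus; infer_instance

-- ===== CLAIM (what is proved, stated in full; the proofs are below) =====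
def Claim_equal_Dos_mayus : Prop := ∀ (dd : String), Dom_Dos_mayus dd → Spec_Dos_mayus dd (Dos_mayus dd)

-- ===== LEMMAS AND PROOFS =====
def pvAnyPair (l : List Char) : Bool :=
  (l.zip (l.drop 1)).any (fun p => pvUp p.1 && pvUp p.2)

-- whether the head (if any) is uppercase
def pvHeadUp : List Char → Bool
  | [] => false
  | c :: _ => pvUp c

theorem pvLoopA_eq (l : List Char) : ∀ first : Bool,
    pvLoopA l first = ((first && pvHeadUp l) || pvAnyPair l) := by
  induction l with
  | nil => intro first; simp [pvLoopA, pvHeadUp, pvAnyPair]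
  | cons c cs ih =>
      intro first
      cases cs with
      | nil =>
          cases h : pvUp c <;> cases first <;>
            simp [pvLoopA, pvHeadUp, pvAnyPair, h]
      | cons d cs' =>
          have hA : pvAnyPair (c :: d :: cs')
              = ((pvUp c && pvUp d) || pvAnyPair (d :: cs')) := by
            simp [pvAnyPair, List.zip]
          rw [show pvLoopA (c :: d :: cs') first
                = (if pvUp c then (if first then true else pvLoopA (d :: cs') true)
                   else pvLoopA (d :: cs') false) from rfl,
              ih, ih, hA]
          cases h1 : pvUp c <;> cases first <;> cases h2 : pvUp d <;>
            simp_all [pvHeadUp]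

-- ===== VERDICT (by name: the statement is the Claim_ definition above) =====
theorem Dos_mayus_spec : Claim_equal_Dos_mayus := by
  intro dd _
  unfold Spec_Dos_mayus Dos_mayus Dos_mayus_alt
  rw [pvLoopA_eq]
  simp [pvHeadUp, pvAnyPair]
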